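-- pv_equiv track=rewrite | github.com/s223646009/BBR_SLM_SIGCOMM26 | llm_framework/plm_special/utils/plm_utils.py | create_device_map
-- ===== SOURCE A (Python) =====
-- import math
--
-- def create_device_map(device_input_side: str, device_output_side: str, device_middle_side: str = None, hidden_layers = 32):
--     """
--     Create device map for any model. The device map is used to evenly split the Llama model into two/three parts on multiple devices.
--     :param device_input_side: The device for the split of the model that receives the input (e.g., 'cuda:0').
--     :param device_output_side: The device for the split of the model that produces the output (e.g., 'cuda:1').
--     :param device_middle_side: The device for the split of the model that lies in the middle (e.g., 'cuda:2').
--     :return: A device map dictionary.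
--     """
--     device_map = {
--         'embed_tokens': device_input_side  # Embedding layer on the input device
--     }
--
--     # Determine the device list based on whether a middle device is provided
--     if device_middle_side is None:
--         device_list = [device_input_side, device_output_side]
--     else:
--         device_list = [device_input_side, device_middle_side, device_output_side]
--
--     # DeepSeek R1 - Llama3 distrill) has 32 transformer blocks
--     num_layers = hidden_layers
--     for i in range(num_layers):
--         # Distribute layers evenly across devices
--         device_map[f'layers.{i}'] = device_list[i // math.ceil(num_layers / len(device_list))]
--
--     # Final normalization layer on the output device
--     device_map['norm'] = device_output_side
--
--     return device_map
-- ===== SOURCE B (Python) =====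
-- def create_device_map(device_input_side: str, device_output_side: str, device_middle_side: str = None, hidden_layers = 32):
--     """Per-device pass over contiguous layer slices instead of a per-layer pass with a division."""
--     if device_middle_side is None:
--         devices = [device_input_side, device_output_side]
--     else:
--         devices = [device_input_side, device_middle_side, device_output_side]
--     device_map = {'embed_tokens': device_input_side}
--     if hidden_layers > 0:
--         chunk = -(-hidden_layers // len(devices))  # ceil division
--         for d, dev in enumerate(devices):
--             for i in range(d * chunk, min((d + 1) * chunk, hidden_layers)):
--                 device_map[f'layers.{i}'] = dev
--     device_map['norm'] = device_output_side
--     return device_map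
-- ===== Notes on version B (the rewrite author's own statement) =====
-- stated objective: alternative
-- what changed: Replaced A's flat per-layer loop that computes a ceiling division and indexes the device list on every iteration with a nested per-device pass that computes the chunk size once and assigns each contiguous slice of layer indices to its device directly.
import Mathlib
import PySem

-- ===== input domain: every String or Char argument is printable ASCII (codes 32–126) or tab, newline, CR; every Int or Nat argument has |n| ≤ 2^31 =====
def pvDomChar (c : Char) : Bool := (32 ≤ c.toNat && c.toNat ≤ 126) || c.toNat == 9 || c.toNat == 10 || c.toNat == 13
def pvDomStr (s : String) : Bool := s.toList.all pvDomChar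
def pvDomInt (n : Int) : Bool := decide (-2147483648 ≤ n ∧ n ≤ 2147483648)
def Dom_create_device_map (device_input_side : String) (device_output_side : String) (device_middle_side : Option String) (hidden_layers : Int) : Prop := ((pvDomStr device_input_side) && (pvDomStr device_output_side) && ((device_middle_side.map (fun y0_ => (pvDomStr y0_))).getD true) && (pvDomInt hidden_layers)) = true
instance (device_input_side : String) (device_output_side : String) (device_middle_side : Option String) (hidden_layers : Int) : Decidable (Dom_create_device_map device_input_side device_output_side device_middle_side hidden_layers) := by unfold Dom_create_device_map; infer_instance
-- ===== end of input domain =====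

-- B replaces A's per-layer loop (ceiling division + index per layer) by a per-device pass
-- over contiguous layer slices; same result, similar cost (objective: alternative).

-- ===== PORT A =====
-- math.ceil(num_layers / len(device_list)) is ported as the integer ceiling -((-n) // k),
-- which is exact for |n| ≤ 2^31 and k ∈ {2,3} (float division error < 2^-22 there).
-- device_list[...] is ported with pyGetD "": the index lies in [0, len) whenever the loop
-- body runs (0 < num_layers ⇒ i // ceil(n/k) < k), so Python never raises and the default is unused.
def create_device_map (device_input_side : String) (device_output_side : String) (device_middle_side : Option String) (hidden_layers : Int) : List (String × String) :=
  let device_map : PySem.Dict String String := (PySem.Dict.empty).insert "embed_tokens" device_input_side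
  let device_list : List String :=
    match device_middle_side with
    | none => [device_input_side, device_output_side]
    | some m => [device_input_side, m, device_output_side]
  let num_layers := hidden_layers
  let device_map :=
    (PySem.List.pyRange 0 num_layers 1).foldl
      (fun d i =>
        d.insert ("layers." ++ PySem.Int.toStr i)
          (PySem.List.pyGetD device_list
            (PySem.Int.floordiv i (-(PySem.Int.floordiv (-num_layers) (device_list.length : Int)))) ""))
      device_map
  (device_map.insert "norm" device_output_side).items

-- ===== PORT B =====
def create_device_map_alt (device_input_side : String) (device_output_side : String) (device_middle_side : Option String) (hidden_layers : Int) : List (String × String) :=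
  let devices : List String :=
    match device_middle_side with
    | none => [device_input_side, device_output_side]
    | some m => [device_input_side, m, device_output_side]
  let device_map : PySem.Dict String String := (PySem.Dict.empty).insert "embed_tokens" device_input_side
  let device_map :=
    if 0 < hidden_layers then
      let chunk := -(PySem.Int.floordiv (-hidden_layers) (devices.length : Int))
      (PySem.List.enumerate devices).foldl
        (fun acc p =>
          (PySem.List.pyRange (p.1 * chunk) (min ((p.1 + 1) * chunk) hidden_layers) 1).foldl
            (fun a i => a.insert ("layers." ++ PySem.Int.toStr i) p.2) acc)
        device_map
    else device_map
  (device_map.insert "norm" device_output_side).items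

-- ===== PRECONDITION & SPEC =====
def Spec_create_device_map (device_input_side : String) (device_output_side : String) (device_middle_side : Option String) (hidden_layers : Int) (out : List (String × String)) : Prop := out = create_device_map_alt device_input_side device_output_side device_middle_side hidden_layers
instance (device_input_side : String) (device_output_side : String) (device_middle_side : Option String) (hidden_layers : Int) (out : List (String × String)) : Decidable (Spec_create_device_map device_input_side device_output_side device_middle_side hidden_layers out) := by unfold Spec_create_device_map; infer_instance

-- ===== CLAIM =====
def Claim_equal_create_device_map : Prop := ∀ (device_input_side : String) (device_output_side : String) (device_middle_side : Option String) (hidden_layers : Int), Dom_create_device_map device_input_side device_output_side device_middle_side hidden_layers → Spec_create_device_map device_input_side device_output_side device_middle_side hidden_layers (create_device_map device_input_side device_output_side device_middle_side hidden_layers)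

-- ===== LEMMAS AND PROOFS =====

-- the shared insertion step
def pvIns (d : PySem.Dict String String) (p : String × String) : PySem.Dict String String :=
  d.insert p.1 p.2

-- a fold of key/value inserts is a fold of pvIns over the list of pairs
theorem pv_A_fold (xs : List Int) (key val : Int → String)
    (d : PySem.Dict String String) :
    xs.foldl (fun d i => d.insert (key i) (val i)) d
      = (xs.map (fun i => (key i, val i))).foldl pvIns d := by
  rw [List.foldl_map]
  rfl

-- B's nested per-device fold is a fold of pvIns over the concatenated slice pair lists
theorem pv_B_fold (l : List (Int × String)) (f : Int × String → List Int)
    (d : PySem.Dict String String) :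
    l.foldl (fun acc p => (f p).foldl
        (fun a i => a.insert ("layers." ++ PySem.Int.toStr i) p.2) acc) d
      = (l.flatMap (fun p => (f p).map
          (fun i => ("layers." ++ PySem.Int.toStr i, p.2)))).foldl pvIns d := by
  induction l generalizing d with
  | nil => rfl
  | cons x xs ih =>
    rw [List.foldl_cons, ih, List.flatMap_cons, List.foldl_append,
      pv_A_fold (f x) (fun i => "layers." ++ PySem.Int.toStr i) (fun _ => x.2)]

-- the core fact: with 0 < n and len ∈ {2,3}, A's per-layer pair list equals the
-- concatenation of B's per-device slice pair lists

theorem pv_core (n : Int) (hn : 0 < n) (devs : List String)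
    (hk : devs.length = 2 ∨ devs.length = 3) :
    (PySem.List.pyRange 0 n 1).map
        (fun i => ("layers." ++ PySem.Int.toStr i,
          PySem.List.pyGetD devs
            (PySem.Int.floordiv i (-(PySem.Int.floordiv (-n) (devs.length : Int)))) ""))
      = (PySem.List.enumerate devs).flatMap
          (fun p => (PySem.List.pyRange (p.1 * (-(PySem.Int.floordiv (-n) (devs.length : Int))))
              (min ((p.1 + 1) * (-(PySem.Int.floordiv (-n) (devs.length : Int)))) n) 1).map
            (fun i => ("layers." ++ PySem.Int.toStr i, p.2))) := by
  rcases hk with hk | hk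
  · obtain ⟨a, b, rfl⟩ := List.length_eq_two.mp hk
    have hlen : (([a, b] : List String).length : Int) = 2 := by simp
    rw [hlen]
    set c : Int := -(PySem.Int.floordiv (-n) 2) with hc
    have hb : (c - 1) * 2 < n ∧ n ≤ c * 2 :=
      (PySem.Int.neg_floordiv_neg_eq_iff_of_pos (by norm_num)).mp hc.symm
    have hc1 : 1 ≤ c := by omega
    have hcn : c ≤ n := by omega
    have e0 : (PySem.List.pyRange 0 c 1).map
        (fun i => (("layers." ++ PySem.Int.toStr i : String),
          PySem.List.pyGetD [a, b] (PySem.Int.floordiv i c) ""))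
        = (PySem.List.pyRange 0 c 1).map
          (fun i => (("layers." ++ PySem.Int.toStr i : String), a)) := by
      refine List.map_congr_left ?_
      intro i hi
      rw [PySem.List.mem_pyRange_one] at hi
      have : PySem.Int.floordiv i c = 0 := by
        rw [PySem.Int.floordiv_eq_iff_of_pos (by omega)]; constructor <;> omega
      simp [this, PySem.List.pyGetD]
    have e1 : (PySem.List.pyRange c n 1).map
        (fun i => (("layers." ++ PySem.Int.toStr i : String),
          PySem.List.pyGetD [a, b] (PySem.Int.floordiv i c) ""))
        = (PySem.List.pyRange c n 1).map
          (fun i => (("layers." ++ PySem.Int.toStr i : String), b)) := by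
      refine List.map_congr_left ?_
      intro i hi
      rw [PySem.List.mem_pyRange_one] at hi
      have : PySem.Int.floordiv i c = 1 := by
        rw [PySem.Int.floordiv_eq_iff_of_pos (by omega)]; constructor <;> omega
      simp [this, PySem.List.pyGetD]
    rw [PySem.List.pyRange_one_append 0 c n (by omega) hcn, List.map_append, e0, e1]
    simp only [PySem.List.enumerate_cons, PySem.List.enumerate_nil, List.flatMap_cons,
      List.flatMap_nil, List.append_nil, zero_mul, zero_add, one_mul]
    rw [min_eq_left hcn, min_eq_right (show n ≤ (1 + 1) * c by omega)]
  · obtain ⟨a, b, d, rfl⟩ := List.length_eq_three.mp hk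
    have hlen : (([a, b, d] : List String).length : Int) = 3 := by simp
    rw [hlen]
    set c : Int := -(PySem.Int.floordiv (-n) 3) with hc
    have hb : (c - 1) * 3 < n ∧ n ≤ c * 3 :=
      (PySem.Int.neg_floordiv_neg_eq_iff_of_pos (by norm_num)).mp hc.symm
    have hc1 : 1 ≤ c := by omega
    have hcn : c ≤ n := by omega
    have e0 : (PySem.List.pyRange 0 c 1).map
        (fun i => (("layers." ++ PySem.Int.toStr i : String),
          PySem.List.pyGetD [a, b, d] (PySem.Int.floordiv i c) ""))
        = (PySem.List.pyRange 0 c 1).map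
          (fun i => (("layers." ++ PySem.Int.toStr i : String), a)) := by
      refine List.map_congr_left ?_
      intro i hi
      rw [PySem.List.mem_pyRange_one] at hi
      have : PySem.Int.floordiv i c = 0 := by
        rw [PySem.Int.floordiv_eq_iff_of_pos (by omega)]; constructor <;> omega
      simp [this, PySem.List.pyGetD]
    have e1 : (PySem.List.pyRange c (min (2 * c) n) 1).map
        (fun i => (("layers." ++ PySem.Int.toStr i : String),
          PySem.List.pyGetD [a, b, d] (PySem.Int.floordiv i c) ""))
        = (PySem.List.pyRange c (min (2 * c) n) 1).map
          (fun i => (("layers." ++ PySem.Int.toStr i : String), b)) := by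
      refine List.map_congr_left ?_
      intro i hi
      rw [PySem.List.mem_pyRange_one] at hi
      have : PySem.Int.floordiv i c = 1 := by
        rw [PySem.Int.floordiv_eq_iff_of_pos (by omega)]; constructor <;> omega
      simp [this, PySem.List.pyGetD]
    have e2 : (PySem.List.pyRange (min (2 * c) n) n 1).map
        (fun i => (("layers." ++ PySem.Int.toStr i : String),
          PySem.List.pyGetD [a, b, d] (PySem.Int.floordiv i c) ""))
        = (PySem.List.pyRange (min (2 * c) n) n 1).map
          (fun i => (("layers." ++ PySem.Int.toStr i : String), d)) := by
      refine List.map_congr_left ?_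
      intro i hi
      rw [PySem.List.mem_pyRange_one] at hi
      have : PySem.Int.floordiv i c = 2 := by
        rw [PySem.Int.floordiv_eq_iff_of_pos (by omega)]; constructor <;> omega
      simp [this, PySem.List.pyGetD]
    have h3 : PySem.List.pyRange (min (2 * c) n) n 1 = PySem.List.pyRange (2 * c) n 1 := by
      by_cases h : 2 * c ≤ n
      · rw [min_eq_left h]
      · rw [min_eq_right (by omega), PySem.List.pyRange_one_eq_nil le_rfl,
          PySem.List.pyRange_one_eq_nil (by omega)]
    rw [PySem.List.pyRange_one_append 0 c n (by omega) hcn,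
      PySem.List.pyRange_one_append c (min (2 * c) n) n (by omega) (by omega),
      List.map_append, List.map_append, e0, e1, e2, h3]
    simp only [PySem.List.enumerate_cons, PySem.List.enumerate_nil, List.flatMap_cons,
      List.flatMap_nil, List.append_nil, zero_mul, zero_add, one_mul]
    rw [min_eq_left hcn, min_eq_right (show n ≤ (1 + 1 + 1) * c by omega)]
    norm_num [List.append_assoc]


theorem create_device_map_spec : Claim_equal_create_device_map := by
  intro di dout dm hl _
  unfold Spec_create_device_map
  dsimp only [create_device_map, create_device_map_alt]
  by_cases hn : 0 < hl
  · rw [if_pos hn]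
    cases dm with
    | none =>
      rw [pv_A_fold _ (fun i => "layers." ++ PySem.Int.toStr i)
            (fun i => PySem.List.pyGetD [di, dout]
              (PySem.Int.floordiv i (-(PySem.Int.floordiv (-hl) (([di, dout] : List String).length : Int)))) ""),
          pv_B_fold _ (fun p => PySem.List.pyRange
              (p.1 * (-(PySem.Int.floordiv (-hl) (([di, dout] : List String).length : Int))))
              (min ((p.1 + 1) * (-(PySem.Int.floordiv (-hl) (([di, dout] : List String).length : Int)))) hl) 1),
          pv_core hl hn [di, dout] (Or.inl rfl)]
    | some m =>
      rw [pv_A_fold _ (fun i => "layers." ++ PySem.Int.toStr i)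
            (fun i => PySem.List.pyGetD [di, m, dout]
              (PySem.Int.floordiv i (-(PySem.Int.floordiv (-hl) (([di, m, dout] : List String).length : Int)))) ""),
          pv_B_fold _ (fun p => PySem.List.pyRange
              (p.1 * (-(PySem.Int.floordiv (-hl) (([di, m, dout] : List String).length : Int))))
              (min ((p.1 + 1) * (-(PySem.Int.floordiv (-hl) (([di, m, dout] : List String).length : Int)))) hl) 1),
          pv_core hl hn [di, m, dout] (Or.inr rfl)]
  · rw [if_neg hn, PySem.List.pyRange_one_eq_nil (by omega), List.foldl_nil]
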